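-- pv_equiv track=rewrite | github.com/divinites/mark | template.py | draw_ticker
-- ===== SOURCE A (Python) =====
-- def draw_ticker(x, limit=5):
--     vacant = u"☐ "
--     ticker = u"☑ "
--     ticker_list = []
--     y = int(x)
--     flag = y - 1
--     for i in range(0, limit):
--         if i == flag:
--             ticker_list.append(ticker)
--         else:
--             ticker_list.append(vacant)
--     return ' ' + ''.join(ticker_list) + ' '
-- ===== SOURCE B (Python) =====
-- def draw_ticker(x, limit=5):
--     vacant = u"\u2610 "
--     ticker = u"\u2611 "
--     flag = int(x) - 1
--     if 0 <= flag < limit: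
--         body = vacant * flag + ticker + vacant * (limit - flag - 1)
--     else:
--         body = vacant * limit
--     return ' ' + body + ' '
-- ===== Notes on version B (the rewrite author's own statement) =====
-- stated objective: simpler
-- what changed: Replaces the per-position loop with an inner equality test and list-append/join by a direct closed-form string construction vacant*flag + ticker + vacant*(limit-flag-1), letting C-level string repetition do the work.
import Mathlib
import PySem

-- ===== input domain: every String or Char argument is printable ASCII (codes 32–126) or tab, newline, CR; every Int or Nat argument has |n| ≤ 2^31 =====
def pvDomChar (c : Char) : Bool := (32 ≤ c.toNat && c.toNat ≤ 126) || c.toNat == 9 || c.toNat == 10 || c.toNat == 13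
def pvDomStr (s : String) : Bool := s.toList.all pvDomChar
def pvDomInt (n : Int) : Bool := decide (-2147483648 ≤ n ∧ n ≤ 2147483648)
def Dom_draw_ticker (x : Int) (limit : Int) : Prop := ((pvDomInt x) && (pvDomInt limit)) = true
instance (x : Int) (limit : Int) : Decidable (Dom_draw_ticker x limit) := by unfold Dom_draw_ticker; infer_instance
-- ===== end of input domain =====

-- B replaces A's per-position loop (append vacant/ticker, then join) by a direct
-- closed-form construction vacant*flag + ticker + vacant*(limit-flag-1); objective: simpler.


-- ===== PORT A =====
def draw_ticker (x : Int) (limit : Int) : String :=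
  let vacant : String := "☐ "
  let ticker : String := "☑ "
  let y := x          -- int(x) on an int is the identity
  let flag := y - 1
  let ticker_list : List String :=
    (PySem.List.pyRange 0 limit 1).foldl
      (fun acc i => if i = flag then acc ++ [ticker] else acc ++ [vacant]) []
  " " ++ PySem.Str.join "" ticker_list ++ " "

-- ===== PORT B =====
-- Python string repetition s * n (empty for n ≤ 0); hand port, exact
def pyRep (s : String) (n : Int) : String := PySem.Str.join "" (List.replicate n.toNat s)

def draw_ticker_alt (x : Int) (limit : Int) : String :=
  let vacant : String := "☐ "
  let ticker : String := "☑ "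
  let flag := x - 1
  let body :=
    if 0 ≤ flag ∧ flag < limit then
      pyRep vacant flag ++ ticker ++ pyRep vacant (limit - flag - 1)
    else
      pyRep vacant limit
  " " ++ body ++ " "

-- ===== PRECONDITION & SPEC =====
def Spec_draw_ticker (x : Int) (limit : Int) (out : String) : Prop := out = draw_ticker_alt x limit
instance (x : Int) (limit : Int) (out : String) : Decidable (Spec_draw_ticker x limit out) := by unfold Spec_draw_ticker; infer_instance

-- ===== CLAIM (what is proved, stated in full; the proofs are below) =====
def Claim_equal_draw_ticker : Prop := ∀ (x : Int) (limit : Int), Dom_draw_ticker x limit → Spec_draw_ticker x limit (draw_ticker x limit)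

-- ===== LEMMAS AND PROOFS =====

theorem pv_join_nil_flatten (xss : List (List Char)) :
    PySem.Chars.join [] xss = xss.flatten := by
  show List.intercalate [] xss = xss.flatten
  induction xss with
  | nil => rfl
  | cons x xs ih =>
    cases xs with
    | nil => simp [List.intercalate]
    | cons y ys =>
      simp only [List.intercalate] at *
      simp [List.intersperse] at *
      simp [ih]

theorem pv_foldl_ite_append (flag : Int) (t v : String) (l : List Int) (acc : List String) :
    l.foldl (fun acc i => if i = flag then acc ++ [t] else acc ++ [v]) acc
      = acc ++ l.map (fun i => if i = flag then t else v) := by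
  induction l generalizing acc with
  | nil => simp
  | cons a l ih => by_cases h : a = flag <;> simp [h, ih]

theorem pv_map_ite_ne (a b flag : Int) (t v : String)
    (h : ∀ i, a ≤ i → i < b → i ≠ flag) :
    (PySem.List.pyRange a b 1).map (fun i => if i = flag then t else v)
      = List.replicate (b - a).toNat v := by
  rw [PySem.List.pyRange_one, List.map_map]
  have hc : ∀ k ∈ List.range (b - a).toNat,
      ((fun i => if i = flag then t else v) ∘ (fun k : Nat => a + (k : Int))) k = v := by
    intro k hk
    have hk' : (k : Int) < b - a := by
      have := List.mem_range.mp hk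
      omega
    have : a + (k : Int) ≠ flag := h _ (by omega) (by omega)
    simp [this]
  rw [List.map_congr_left hc]
  simp

-- the bodies (between the surrounding spaces) agree
theorem pv_body_eq (x limit : Int) :
    PySem.Str.join ""
      ((PySem.List.pyRange 0 limit 1).foldl
        (fun acc i => if i = x - 1 then acc ++ ["☑ "] else acc ++ ["☐ "]) [])
      = (if 0 ≤ x - 1 ∧ x - 1 < limit then
          pyRep "☐ " (x - 1) ++ "☑ " ++ pyRep "☐ " (limit - (x - 1) - 1)
        else pyRep "☐ " limit) := by
  set flag := x - 1 with hf
  rw [pv_foldl_ite_append flag "☑ " "☐ " _ []]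
  rw [List.nil_append]
  by_cases h : 0 ≤ flag ∧ flag < limit
  · rw [if_pos h]
    have hsplit : PySem.List.pyRange 0 limit 1
        = PySem.List.pyRange 0 flag 1 ++ PySem.List.pyRange flag limit 1 :=
      PySem.List.pyRange_one_append 0 flag limit h.1 (le_of_lt h.2)
    have hcons : PySem.List.pyRange flag limit 1
        = flag :: PySem.List.pyRange (flag + 1) limit 1 :=
      PySem.List.pyRange_one_cons h.2
    rw [hsplit, hcons]
    rw [List.map_append, List.map_cons]
    rw [pv_map_ite_ne 0 flag flag _ _ (by intro i _ hi; omega)]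
    rw [pv_map_ite_ne (flag + 1) limit flag _ _ (by intro i hi _; omega)]
    apply String.toList_inj.mp
    simp only [PySem.Str.toList_join, pv_join_nil_flatten, List.map_append, List.map_cons,
      List.flatten_append, List.flatten_cons, List.map_replicate,
      String.toList_append, pyRep]
    have e1 : (flag - 0).toNat = flag.toNat := by omega
    have e2 : (limit - (flag + 1)).toNat = (limit - flag - 1).toNat := by omega
    have hb : "".toList = ([] : List Char) := rfl
    rw [e1, e2, hb, pv_join_nil_flatten, pv_join_nil_flatten, pv_join_nil_flatten]
    simp
  · rw [if_neg h]
    rw [pv_map_ite_ne 0 limit flag _ _ (by intro i hi hi2; omega)]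
    apply String.toList_inj.mp
    simp only [PySem.Str.toList_join, pv_join_nil_flatten, List.map_replicate,
       pyRep]
    have e1 : limit - 0 = limit := by omega
    rw [e1]

-- ===== VERDICT (by name: the statement is the Claim_ definition above) =====
theorem draw_ticker_spec : Claim_equal_draw_ticker := by
  intro x limit _
  show draw_ticker x limit = draw_ticker_alt x limit
  unfold draw_ticker draw_ticker_alt
  simp only []
  rw [pv_body_eq x limit]
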